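-- pv_equiv track=rewrite | github.com/JungHoiMin/coding_study | cs_python/괄호 변환.py | solution
-- ===== SOURCE A (Python) =====
-- def solution(p):
--     answer = ''
--     n = len(p)
--     while True:
--         u, p = balance(p)
--         u = "".join(u)
--         p = "".join(p)
--         answer += correctString(u)
--         if len(answer) == n:
--             break
--     return answer
--
-- def balance(s):
--     Lcnt = 0
--     Rcnt = 0
--
--     u = list()
--     v = list()
--     for i in s:
--         if i == '(':
--             Lcnt += 1
--         else:
--             Rcnt += 1
--         u.append(i)
--         if Lcnt == Rcnt:
--             break
--     v.append(s[len(u):])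
--     return u, v
--
-- def correctString(u):
--     n = len(u)
--     newU = ('('*(int(n/2)) + (')'*int(n/2)))
--     return newU
-- ===== SOURCE B (Python) =====
-- def solution(p):
--     out = []
--     bal = 0
--     c = 0
--     for ch in p:
--         bal += 1 if ch == '(' else -1
--         c += 1
--         if bal == 0:
--             k = c // 2
--             out.append('(' * k + ')' * k)
--             c = 0
--     if c:
--         k = c // 2
--         out.append('(' * k + ')' * k)
--     return ''.join(out)
-- ===== Notes on version B (the rewrite author's own statement) =====
-- stated objective: alternative
-- what changed: Replaces A's repeated balance/slice/join passes over the shrinking remainder (O(n^2)) with a single left-to-right pass keeping a running balance counter, emitting '('*k+')'*k at each balance-zero boundary; Pre_ excludes odd-length strings, on which A loops forever and never returns while B returns the joined even chunks.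
-- outside the precondition, e.g. on solution('('): A does not finish within the time limit, B returns ''; on solution(')'): A does not finish within the time limit, B returns ''
import Mathlib
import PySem

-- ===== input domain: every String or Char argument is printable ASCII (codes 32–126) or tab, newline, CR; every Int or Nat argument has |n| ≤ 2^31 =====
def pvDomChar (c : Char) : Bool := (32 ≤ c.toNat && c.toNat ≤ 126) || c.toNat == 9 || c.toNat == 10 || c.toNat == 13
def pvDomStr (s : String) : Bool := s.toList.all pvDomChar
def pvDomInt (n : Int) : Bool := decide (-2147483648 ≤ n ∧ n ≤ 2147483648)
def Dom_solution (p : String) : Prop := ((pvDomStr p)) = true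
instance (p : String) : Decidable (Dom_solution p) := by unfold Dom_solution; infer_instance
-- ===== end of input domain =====

-- B replaces A's repeated balance/slice/join passes over the shrinking remainder with a
-- single left-to-right pass keeping a running balance counter (alternative algorithm).

-- ===== PORT A =====
-- helper 'balance': walk s counting '(' as Lcnt and every other char as Rcnt, appending
-- each char to u and breaking at the first point where Lcnt = Rcnt.
def pvBalanceGo (s : List Char) (L R : Int) (u : List Char) : List Char :=
  match s with
  | [] => u
  | c :: rest =>
    let L' := if c = '(' then L + 1 else L
    let R' := if c = '(' then R else R + 1
    let u' := u ++ [c]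
    if L' = R' then u' else pvBalanceGo rest L' R' u'

-- balance returns (u, remainder); v.append(s[len(u):]) + "".join makes v the remainder string
def pvBalance (s : List Char) : List Char × List Char :=
  let u := pvBalanceGo s 0 0 []
  (u, s.drop u.length)

-- helper 'correctString': '(' * int(n/2) + ')' * int(n/2)  (n = len(u) ≥ 0, so int(n/2) = n / 2)
def pvCorrect (u : List Char) : List Char :=
  List.replicate (u.length / 2) '(' ++ List.replicate (u.length / 2) ')'

-- the 'while True' loop; the fuel (length+1 at top level) only makes the loop total:
-- on odd-length input the Python loop never terminates (those inputs are excluded by Pre_).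
def pvLoopA (fuel : Nat) (answer p : List Char) (n : Nat) : List Char :=
  match fuel with
  | 0 => answer
  | fuel + 1 =>
    let u := (pvBalance p).1
    let p' := (pvBalance p).2
    let answer' := answer ++ pvCorrect u
    if answer'.length = n then answer' else pvLoopA fuel answer' p' n

def solution (p : String) : String :=
  String.ofList (pvLoopA (p.toList.length + 1) [] p.toList p.toList.length)

-- ===== PORT B =====
-- '(' * k + ')' * k
def pvChunk (k : Nat) : List Char :=
  List.replicate k '(' ++ List.replicate k ')'

-- single pass: bal = running balance, c = length of the current chunk, out = output so far
def pvGoB (s : List Char) (bal : Int) (c : Nat) (out : List Char) : List Char :=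
  match s with
  | [] => if c ≠ 0 then out ++ pvChunk (c / 2) else out
  | ch :: rest =>
    let bal' := bal + (if ch = '(' then 1 else -1)
    if bal' = 0 then pvGoB rest bal' 0 (out ++ pvChunk ((c + 1) / 2))
    else pvGoB rest bal' (c + 1) out

def solution_alt (p : String) : String :=
  String.ofList (pvGoB p.toList 0 0 [])

-- ===== PRECONDITION & SPEC =====
-- Pre_ excludes odd-length strings: on those the Python A loops forever (it never returns a value), while B returns the joined even chunks.
def Pre_solution (p : String) : Prop := p.toList.length % 2 = 0
instance (p : String) : Decidable (Pre_solution p) := by unfold Pre_solution; infer_instance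

def pvWitness_solution : String := "()ab"

def Spec_solution (p : String) (out : String) : Prop := out = solution_alt p
instance (p : String) (out : String) : Decidable (Spec_solution p out) := by unfold Spec_solution; infer_instance

-- ===== CLAIM (what is proved, stated in full; the proofs are below) =====
def Claim_equal_solution : Prop := ∀ (p : String), Dom_solution p → Pre_solution p → Spec_solution p (solution p)

-- ===== LEMMAS AND PROOFS =====

-- proof-side splitter: first position (1-based count) from running balance 'bal' where the
-- balance hits 0, together with the rest of the list; none if it never does.
def pvSplit1 (s : List Char) (bal : Int) : Option (Nat × List Char) :=
  match s with
  | [] => none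
  | c :: rest =>
    let bal' := bal + (if c = '(' then 1 else -1)
    if bal' = 0 then some (1, rest)
    else (pvSplit1 rest bal').map (fun kr => (kr.1 + 1, kr.2))

theorem pvGoB_split (s : List Char) : ∀ (bal : Int) (c : Nat) (out : List Char),
    pvGoB s bal c out =
      match pvSplit1 s bal with
      | some (k, rest) => pvGoB rest 0 0 (out ++ pvChunk ((c + k) / 2))
      | none => if c + s.length ≠ 0 then out ++ pvChunk ((c + s.length) / 2) else out := by
  induction s with
  | nil => intro bal c out; simp [pvGoB, pvSplit1]
  | cons ch rest ih =>
    intro bal c out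
    simp only [pvGoB, pvSplit1]
    by_cases h : bal + (if ch = '(' then 1 else -1) = 0
    · simp [h]
    · rw [if_neg h, if_neg h, ih]
      cases hsp : pvSplit1 rest (bal + (if ch = '(' then 1 else -1)) with
      | none =>
        simp only [hsp, Option.map_none, List.length_cons]
        have e : c + 1 + rest.length = c + (rest.length + 1) := by omega
        rw [e]
      | some kr =>
        simp only [hsp, Option.map_some]
        have e : c + 1 + kr.1 = c + (kr.1 + 1) := by omega
        rw [e]

theorem pvBalanceGo_split (s : List Char) : ∀ (L R : Int) (u : List Char),
    pvBalanceGo s L R u =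
      match pvSplit1 s (L - R) with
      | some (k, _) => u ++ s.take k
      | none => u ++ s := by
  induction s with
  | nil => intro L R u; simp [pvBalanceGo, pvSplit1]
  | cons ch rest ih =>
    intro L R u
    simp only [pvBalanceGo, pvSplit1]
    by_cases hc : ch = '('
    · subst hc
      simp only [if_pos rfl, reduceIte]
      by_cases h : L + 1 = R
      · have h2 : (L - R) + 1 = 0 := by omega
        simp [h, h2]
      · have h2 : (L - R) + 1 ≠ 0 := by omega
        have e : L + 1 - R = L - R + 1 := by ring
        rw [if_neg h, if_neg h2, ih, e]
        cases hsp : pvSplit1 rest (L - R + 1) with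
        | none => simp [hsp]
        | some kr => simp [hsp, List.take_succ_cons]
    · simp only [if_neg hc]
      by_cases h : L = R + 1
      · have h2 : (L - R) + (-1) = 0 := by omega
        simp [h, h2]
      · have h2 : (L - R) + (-1) ≠ 0 := by omega
        have e : L - (R + 1) = L - R + (-1) := by ring
        rw [if_neg h, if_neg h2, ih, e]
        cases hsp : pvSplit1 rest (L - R + (-1)) with
        | none => simp [hsp]
        | some kr => simp [hsp, List.take_succ_cons]

theorem pvChunk_length (k : Nat) : (pvChunk k).length = 2 * k := by
  simp [pvChunk]; omega

theorem pvSplit1_facts (s : List Char) : ∀ (bal : Int) (k : Nat) (rest : List Char),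
    pvSplit1 s bal = some (k, rest) →
    rest = s.drop k ∧ 1 ≤ k ∧ k ≤ s.length ∧ (bal + (k : Int)) % 2 = 0 := by
  induction s with
  | nil => intro bal k rest h; simp [pvSplit1] at h
  | cons ch rest0 ih =>
    intro bal k rest h
    simp only [pvSplit1] at h
    by_cases hz : bal + (if ch = '(' then 1 else -1) = 0
    · rw [if_pos hz] at h
      simp only [Option.some_inj, Prod.mk.injEq] at h
      obtain ⟨hk, hr⟩ := h
      subst hk; subst hr
      refine ⟨rfl, le_refl 1, by simp, ?_⟩
      by_cases hc : ch = '(' <;> simp only [hc, if_pos, if_neg, reduceIte] at hz <;> push_cast <;> omega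
    · rw [if_neg hz] at h
      cases hsp : pvSplit1 rest0 (bal + (if ch = '(' then 1 else -1)) with
      | none => rw [hsp] at h; simp at h
      | some kr =>
        rw [hsp] at h; simp only [Option.map_some, Option.some_inj, Prod.mk.injEq] at h
        obtain ⟨hk, hr⟩ := h
        obtain ⟨h1, h2, h3, h4⟩ := ih _ kr.1 kr.2 (by rw [hsp])
        subst hk; subst hr
        refine ⟨by simp [h1], by omega, by simp; omega, ?_⟩
        by_cases hc : ch = '(' <;> simp only [hc, reduceIte] at h4 <;> push_cast at h4 ⊢ <;> omega
theorem pvMain (N : Nat) : ∀ (s : List Char), s.length ≤ N → ∀ (f : Nat), s.length + 1 ≤ f →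
    ∀ (acc : List Char), s.length % 2 = 0 →
    pvLoopA f acc s (acc.length + s.length) = pvGoB s 0 0 acc := by
  induction N with
  | zero =>
    intro s hs f hf acc _
    have hnil : s = [] := List.eq_nil_of_length_eq_zero (by omega)
    subst hnil
    obtain ⟨f', rfl⟩ : ∃ f', f = f' + 1 := ⟨f - 1, by omega⟩
    simp [pvLoopA, pvBalance, pvBalanceGo, pvCorrect, pvGoB]
  | succ N ih =>
    intro s hs f hf acc hev
    obtain ⟨f', rfl⟩ : ∃ f', f = f' + 1 := ⟨f - 1, by omega⟩
    simp only [pvLoopA, pvBalance]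
    rw [pvBalanceGo_split, pvGoB_split]
    rw [show (0:Int) - 0 = 0 from rfl]
    cases hsp : pvSplit1 s 0 with
    | none =>
      simp only [hsp, List.nil_append]
      have hlen : (pvCorrect s).length = s.length := by
        simp only [pvCorrect, List.length_append, List.length_replicate]; omega
      have hcchunk : pvCorrect s = pvChunk ((0 + s.length) / 2) := by
        simp [pvCorrect, pvChunk]
      rw [if_pos (by rw [List.length_append, hlen])]
      by_cases hn : s = []
      · subst hn; simp [pvCorrect, pvChunk]
      · rw [if_pos (by intro h0; exact hn (List.eq_nil_of_length_eq_zero (by omega))), hcchunk]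
    | some kr =>
      obtain ⟨k, rest⟩ := kr
      obtain ⟨h1, h2, h3, h4⟩ := pvSplit1_facts s 0 k rest hsp
      have hkev : k % 2 = 0 := by omega
      have htk : ((List.take k s)).length = k := by simp; omega
      have hclen : (pvCorrect (List.take k s)).length = k := by
        simp only [pvCorrect, List.length_append, List.length_replicate, htk]; omega
      have hcchunk : pvCorrect (List.take k s) = pvChunk ((0 + k) / 2) := by
        simp [pvCorrect, pvChunk, htk]
      simp only [hsp, List.nil_append, htk, hcchunk]
      by_cases hend : k = s.length
      · have hrest : rest = [] := by
          rw [h1]; exact List.drop_eq_nil_of_le (by omega)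
        rw [if_pos (by rw [List.length_append, ← hcchunk, hclen]; omega), hrest]
        simp [pvGoB]
      · have hlt : k < s.length := lt_of_le_of_ne h3 hend
        rw [if_neg (by rw [List.length_append, ← hcchunk, hclen]; omega), ← h1]
        have e : acc.length + s.length = (acc ++ pvChunk ((0 + k) / 2)).length + rest.length := by
          rw [List.length_append, pvChunk_length, h1, List.length_drop]; omega
        rw [e]
        exact ih rest (by rw [h1, List.length_drop]; omega) f'
          (by rw [h1, List.length_drop]; omega) _ (by rw [h1, List.length_drop]; omega)

-- ===== VERDICT (by name: the statement is the Claim_ definition above) =====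
theorem solution_spec : Claim_equal_solution := by
  intro p _ hpre
  unfold Spec_solution solution solution_alt
  have h := pvMain p.toList.length p.toList (le_refl _) (p.toList.length + 1) (le_refl _) [] hpre
  rw [List.length_nil, Nat.zero_add] at h
  rw [h]
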